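-- pv_equiv track=rewrite | github.com/damn-ice/dsa-practice | dynamic_programming.py | maximum_revenue
-- ===== SOURCE A (Python) =====
-- def maximum_revenue(coins: list):
--     """Maximum revenue while the opponents is also maximizing"""
--
--     def compute_maximum_revenue_for_range(a: int, b: int):
--         # No coins left...
--         if a > b:
--             return 0
--
--         if maximum_revenue_for_range[a][b] == 0:
--             # Select coin plus the minimum due to opponent also maximizing revenue...
--             max_revenue_a = coins[a] + min(
--                 compute_maximum_revenue_for_range(a + 2, b),
--                 compute_maximum_revenue_for_range(a + 1, b - 1),
--             )
--
--             max_revenue_b = coins[b] + min(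
--                 compute_maximum_revenue_for_range(a + 1, b - 1),
--                 compute_maximum_revenue_for_range(a, b - 2),
--             )
--             maximum_revenue_for_range[a][b] = max(max_revenue_a, max_revenue_b)
--         return maximum_revenue_for_range[a][b]
--
--     maximum_revenue_for_range = [[0] * len(coins) for _ in coins]
--     return compute_maximum_revenue_for_range(0, len(coins) - 1)
-- ===== SOURCE B (Python) =====
-- def maximum_revenue(coins: list):
--     """Maximum revenue while the opponent is also maximizing (bottom-up tabulation)."""
--     n = len(coins)
--     dp = {}
--
--     def get(a, b):
--         return 0 if a > b else dp.get((a, b), 0)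
--
--     for length in range(n):
--         for a in range(n - length):
--             b = a + length
--             dp[(a, b)] = max(
--                 coins[a] + min(get(a + 2, b), get(a + 1, b - 1)),
--                 coins[b] + min(get(a + 1, b - 1), get(a, b - 2)),
--             )
--     return dp.get((0, n - 1), 0)
-- ===== Notes on version B (the rewrite author's own statement) =====
-- stated objective: alternative
-- what changed: Replaced memoized top-down recursion (with a 0-sentinel memo table) by an iterative bottom-up tabulation over subrange lengths in a dictionary, with no recursion at all.
import Mathlib
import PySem

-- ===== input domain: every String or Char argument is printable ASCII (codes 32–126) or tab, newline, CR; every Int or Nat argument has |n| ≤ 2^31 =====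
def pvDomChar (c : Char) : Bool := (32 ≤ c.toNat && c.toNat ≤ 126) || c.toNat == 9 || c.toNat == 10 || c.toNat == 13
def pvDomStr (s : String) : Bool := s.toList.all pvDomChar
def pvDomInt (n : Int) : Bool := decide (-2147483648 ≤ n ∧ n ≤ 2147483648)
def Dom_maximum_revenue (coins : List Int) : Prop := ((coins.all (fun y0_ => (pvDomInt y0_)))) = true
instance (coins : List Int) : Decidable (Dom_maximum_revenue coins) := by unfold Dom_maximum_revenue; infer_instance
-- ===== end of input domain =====

-- B replaces A's memoized top-down recursion by an iterative bottom-up tabulation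
-- over subrange lengths (objective: alternative — same recurrence, no recursion, no memo sentinel).

-- ===== PORT A =====
-- table read t[a][b] (indices always in range when Python reads them; getD is exact there)
def pvTGet (t : List (List Int)) (a b : Int) : Int := (t.getD a.toNat []).getD b.toNat 0

-- table write t[a][b] = v (List.set = Python in-range item assignment)
def pvTSet (t : List (List Int)) (a b : Int) (v : Int) : List (List Int) :=
  t.set a.toNat ((t.getD a.toNat []).set b.toNat v)

-- inner recursive helper compute_maximum_revenue_for_range, threading the memo table;
-- fuel is a pure totality guard (each call shrinks b - a by 2; the initial fuel below always suffices,
-- so the 0 branch is never reached)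
def pvComputeA (coins : List Int) : Nat → Int → Int → List (List Int) → Int × List (List Int)
  | 0, _, _, t => (0, t)
  | fuel + 1, a, b, t =>
    if a > b then (0, t)
    else if pvTGet t a b = 0 then
      let p1 := pvComputeA coins fuel (a + 2) b t
      let p2 := pvComputeA coins fuel (a + 1) (b - 1) p1.2
      let maxRevA := coins.getD a.toNat 0 + min p1.1 p2.1
      let p3 := pvComputeA coins fuel (a + 1) (b - 1) p2.2
      let p4 := pvComputeA coins fuel a (b - 2) p3.2
      let maxRevB := coins.getD b.toNat 0 + min p3.1 p4.1
      let t' := pvTSet p4.2 a b (max maxRevA maxRevB)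
      (pvTGet t' a b, t')
    else (pvTGet t a b, t)

def maximum_revenue (coins : List Int) : Int :=
  let table := List.replicate coins.length (List.replicate coins.length (0 : Int))
  (pvComputeA coins (coins.length + 2) 0 (coins.length - 1) table).1

-- ===== PORT B =====
-- helper get(a, b): 0 out of range, else dp lookup with default 0
def pvBGet (dp : PySem.Dict (Int × Int) Int) (a b : Int) : Int :=
  if a > b then 0 else dp.getD (a, b) 0

def maximum_revenue_alt (coins : List Int) : Int :=
  let n : Int := coins.length
  let dp : PySem.Dict (Int × Int) Int :=
    (PySem.List.pyRange 0 n 1).foldl (fun dp length =>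
      (PySem.List.pyRange 0 (n - length) 1).foldl (fun dp a =>
        let b := a + length
        dp.insert (a, b) (max
          (coins.getD a.toNat 0 + min (pvBGet dp (a + 2) b) (pvBGet dp (a + 1) (b - 1)))
          (coins.getD b.toNat 0 + min (pvBGet dp (a + 1) (b - 1)) (pvBGet dp a (b - 2))))) dp)
      PySem.Dict.empty
  dp.getD (0, n - 1) 0

-- ===== PRECONDITION & SPEC =====
def Spec_maximum_revenue (coins : List Int) (out : Int) : Prop := out = maximum_revenue_alt coins
instance (coins : List Int) (out : Int) : Decidable (Spec_maximum_revenue coins out) := by unfold Spec_maximum_revenue; infer_instance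

-- ===== CLAIM (what is proved, stated in full; the proofs are below) =====
def Claim_equal_maximum_revenue : Prop := ∀ (coins : List Int), Dom_maximum_revenue coins → Spec_maximum_revenue coins (maximum_revenue coins)

-- ===== LEMMAS AND PROOFS =====

-- the pure game value both programs compute
def pvVal (coins : List Int) (a b : Int) : Int :=
  if a > b then 0
  else
    max (coins.getD a.toNat 0 + min (pvVal coins (a + 2) b) (pvVal coins (a + 1) (b - 1)))
        (coins.getD b.toNat 0 + min (pvVal coins (a + 1) (b - 1)) (pvVal coins a (b - 2)))
termination_by (b - a + 2).toNat
decreasing_by all_goals omega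

lemma pvVal_base (coins : List Int) (a b : Int) (h : a > b) : pvVal coins a b = 0 := by
  rw [pvVal]; simp [h]

lemma pvVal_step (coins : List Int) (a b : Int) (h : ¬ a > b) :
    pvVal coins a b =
      max (coins.getD a.toNat 0 + min (pvVal coins (a + 2) b) (pvVal coins (a + 1) (b - 1)))
          (coins.getD b.toNat 0 + min (pvVal coins (a + 1) (b - 1)) (pvVal coins a (b - 2))) := by
  rw [pvVal]; simp [h]

-- ----- A-side -----

def pvShape (n : Nat) (t : List (List Int)) : Prop :=
  t.length = n ∧ ∀ r ∈ t, r.length = n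

def pvInv (coins : List Int) (t : List (List Int)) : Prop :=
  ∀ i j : Nat, pvTGet t i j = 0 ∨ pvTGet t i j = pvVal coins i j

lemma pvShape_set (n : Nat) (t : List (List Int)) (a b : Int) (v : Int)
    (h : pvShape n t) : pvShape n (pvTSet t a b v) := by
  obtain ⟨h1, h2⟩ := h
  refine ⟨by simp [pvTSet, h1], ?_⟩
  rcases Nat.lt_or_ge a.toNat t.length with hl | hl
  · intro r hr
    rcases List.mem_or_eq_of_mem_set hr with h' | h'
    · exact h2 r h'
    · subst h'
      rw [List.length_set]
      exact h2 _ (by rw [List.getD_eq_getElem?_getD, List.getElem?_eq_getElem hl]; exact List.getElem_mem hl)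
  · rw [pvTSet, List.set_eq_of_length_le hl]
    exact h2

lemma pvTGet_set_self (n : Nat) (t : List (List Int)) (a b : Int) (v : Int)
    (hs : pvShape n t) (ha0 : 0 ≤ a) (ha : a < (n : Int)) (hb0 : 0 ≤ b) (hb : b < (n : Int)) :
    pvTGet (pvTSet t a b v) a b = v := by
  obtain ⟨h1, h2⟩ := hs
  have hal : a.toNat < t.length := by omega
  have hrow : (t.getD a.toNat []).length = n := by
    rw [List.getD_eq_getElem?_getD, List.getElem?_eq_getElem hal]
    exact h2 _ (by simp)
  have hbl : b.toNat < (t.getD a.toNat []).length := by omega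
  simp only [pvTGet, pvTSet, List.getD_eq_getElem?_getD] at *
  rw [List.getElem?_set_self hal]
  simp only [Option.getD_some]
  rw [List.getElem?_set_self hbl]
  rfl

lemma pvTGet_set_ne (t : List (List Int)) (a b : Int) (v : Int) (i j : Nat)
    (hne : (i : Int) ≠ a ∨ (j : Int) ≠ b) (ha0 : 0 ≤ a) (hb0 : 0 ≤ b) :
    pvTGet (pvTSet t a b v) i j = pvTGet t i j := by
  simp only [pvTGet, pvTSet, List.getD_eq_getElem?_getD, Int.toNat_natCast]
  rcases Decidable.em (i = a.toNat) with hi | hi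
  · have hj : j ≠ b.toNat := by
      rcases hne with h | h
      · exfalso; apply h; omega
      · omega
    subst hi
    rcases Nat.lt_or_ge a.toNat t.length with hl | hl
    · rw [List.getElem?_set_self hl]
      simp only [Option.getD_some]
      rw [List.getElem?_set_ne (by omega : b.toNat ≠ j)]
    · rw [List.set_eq_of_length_le hl]
  · rw [List.getElem?_set_ne (by omega : a.toNat ≠ i)]
lemma pvTGet_set_cases (t : List (List Int)) (a b : Int) (v : Int) (i j : Nat)
    (ha0 : 0 ≤ a) (hb0 : 0 ≤ b) :
    pvTGet (pvTSet t a b v) i j = pvTGet t i j ∨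
      ((i : Int) = a ∧ (j : Int) = b ∧ pvTGet (pvTSet t a b v) i j = v) := by
  rcases Decidable.em ((i : Int) = a ∧ (j : Int) = b) with ⟨hi, hj⟩ | hne
  · have hia : i = a.toNat := by omega
    have hjb : j = b.toNat := by omega
    subst hia hjb
    rcases Nat.lt_or_ge a.toNat t.length with hl | hl
    · rcases Nat.lt_or_ge b.toNat (t.getD a.toNat []).length with hbl | hbl <;>
        simp only [List.getD_eq_getElem?_getD] at hbl
      · right
        refine ⟨by omega, by omega, ?_⟩
        simp only [pvTGet, pvTSet, List.getD_eq_getElem?_getD, Int.toNat_natCast]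
        rw [List.getElem?_set_self hl]
        simp only [Option.getD_some]
        rw [List.getElem?_set_self hbl]
        rfl
      · left
        simp only [pvTGet, pvTSet, List.getD_eq_getElem?_getD, Int.toNat_natCast]
        rw [List.set_eq_of_length_le hbl, List.getElem?_set_self hl,
          List.getElem?_eq_getElem hl]
        rfl
    · left
      rw [pvTSet, List.set_eq_of_length_le hl]
  · left
    exact pvTGet_set_ne t a b v i j (by tauto) ha0 hb0

lemma pvInv_set (coins : List Int) (t : List (List Int)) (a b : Int)
    (ha0 : 0 ≤ a) (hb0 : 0 ≤ b)
    (hinv : pvInv coins t) : pvInv coins (pvTSet t a b (pvVal coins a b)) := by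
  intro i j
  rcases pvTGet_set_cases t a b (pvVal coins a b) i j ha0 hb0 with h | ⟨hi, hj, h⟩
  · rw [h]; exact hinv i j
  · right
    rw [h, hi, hj]

lemma pvComputeA_correct (coins : List Int) :
    ∀ (g : Nat) (a b : Int) (t : List (List Int)), (b - a + 2).toNat ≤ g →
      0 ≤ a → b < (coins.length : Int) →
      pvShape coins.length t → pvInv coins t →
      (pvComputeA coins g a b t).1 = pvVal coins a b ∧
      pvShape coins.length (pvComputeA coins g a b t).2 ∧
      pvInv coins (pvComputeA coins g a b t).2 := by
  intro g
  induction g with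
  | zero =>
    intro a b t hg ha hb hs hinv
    have hab : a > b := by omega
    simp [pvComputeA, pvVal_base coins a b hab, hs, hinv]
  | succ g ih =>
    intro a b t hg ha hb hs hinv
    rw [pvComputeA]
    by_cases hab : a > b
    · simp [hab, pvVal_base coins a b hab, hs, hinv]
    · simp only [hab, if_false]
      by_cases hmemo : pvTGet t a b = 0
      · simp only [hmemo, if_true]
        have hb0 : 0 ≤ b := by omega
        have hg1 : (b - (a + 2) + 2).toNat ≤ g := by omega
        have hg2 : (b - 1 - (a + 1) + 2).toNat ≤ g := by omega
        have hg3 : (b - 2 - a + 2).toNat ≤ g := by omega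
        obtain ⟨e1, s1, i1⟩ := ih (a + 2) b t hg1 (by omega) hb hs hinv
        obtain ⟨e2, s2, i2⟩ := ih (a + 1) (b - 1) _ hg2 (by omega) (by omega) s1 i1
        obtain ⟨e3, s3, i3⟩ := ih (a + 1) (b - 1) _ hg2 (by omega) (by omega) s2 i2
        obtain ⟨e4, s4, i4⟩ := ih a (b - 2) _ hg3 ha (by omega) s3 i3
        have hval : max (coins.getD a.toNat 0 + min (pvComputeA coins g (a+2) b t).1 (pvComputeA coins g (a+1) (b-1) (pvComputeA coins g (a+2) b t).2).1)
            (coins.getD b.toNat 0 + min (pvComputeA coins g (a+1) (b-1) (pvComputeA coins g (a+1) (b-1) (pvComputeA coins g (a+2) b t).2).2).1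
              (pvComputeA coins g a (b-2) (pvComputeA coins g (a+1) (b-1) (pvComputeA coins g (a+1) (b-1) (pvComputeA coins g (a+2) b t).2).2).2).1) = pvVal coins a b := by
          rw [e1, e2, e3, e4, pvVal_step coins a b hab]
        refine ⟨?_, ?_, ?_⟩
        · rw [hval, pvTGet_set_self coins.length _ a b _ s4 ha (by omega) hb0 hb]
        · exact pvShape_set _ _ _ _ _ s4
        · rw [hval]
          exact pvInv_set coins _ a b ha hb0 i4
      · simp only [hmemo, if_false]
        rcases hinv a.toNat b.toNat with h0 | hv
        · exact absurd (by rwa [Int.toNat_of_nonneg ha, Int.toNat_of_nonneg (by omega)] at h0) hmemo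
        · rw [Int.toNat_of_nonneg ha, Int.toNat_of_nonneg (by omega)] at hv
          exact ⟨hv, hs, hinv⟩

lemma pvInv_init (coins : List Int) (n : Nat) :
    pvInv coins (List.replicate n (List.replicate n (0 : Int))) := by
  intro i j
  left
  simp only [pvTGet, List.getD_eq_getElem?_getD, List.getElem?_replicate]
  split <;> (simp [List.getElem?_replicate]; try split) <;> simp

lemma maximum_revenue_eq_val (coins : List Int) :
    maximum_revenue coins = pvVal coins 0 ((coins.length : Int) - 1) := by
  have hs : pvShape coins.length (List.replicate coins.length (List.replicate coins.length (0 : Int))) := by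
    constructor
    · simp
    · intro r hr; rw [List.eq_of_mem_replicate hr]; simp
  exact (pvComputeA_correct coins (coins.length + 2) 0 ((coins.length : Int) - 1) _ (by omega) le_rfl
    (by omega) hs (pvInv_init coins coins.length)).1

-- ----- B-side -----

def pvQ (coins : List Int) (d : PySem.Dict (Int × Int) Int) (L : Int) : Prop :=
  ∀ a b : Int, 0 ≤ a → a ≤ b → b < (coins.length : Int) → b - a < L →
    d.getD (a, b) 0 = pvVal coins a b

lemma pvBGet_eq_val (coins : List Int) (d : PySem.Dict (Int × Int) Int) (L a b : Int)
    (hq : pvQ coins d L) (ha : 0 ≤ a) (hb : b < (coins.length : Int)) (hgap : b - a < L) :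
    pvBGet d a b = pvVal coins a b := by
  unfold pvBGet
  by_cases hab : a > b
  · simp [hab, pvVal_base coins a b hab]
  · simp only [hab, if_false]
    exact hq a b ha (by omega) hb hgap

-- inner loop: processes a ∈ [lo, n-L); preserves gap-<L entries, sets (a, a+L) entries
lemma pvInner (coins : List Int) (L : Int) (hL : 0 ≤ L) :
    ∀ (lo : Int) (d : PySem.Dict (Int × Int) Int), 0 ≤ lo →
      pvQ coins d L →
      (∀ a : Int, 0 ≤ a → a < lo → d.getD (a, a + L) 0 = pvVal coins a (a + L)) →
      pvQ coins ((PySem.List.pyRange lo ((coins.length : Int) - L) 1).foldl (fun dp a =>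
        let b := a + L
        dp.insert (a, b) (max
          (coins.getD a.toNat 0 + min (pvBGet dp (a + 2) b) (pvBGet dp (a + 1) (b - 1)))
          (coins.getD b.toNat 0 + min (pvBGet dp (a + 1) (b - 1)) (pvBGet dp a (b - 2))))) d)
        (L + 1) := by
  intro lo
  by_cases hend : lo < (coins.length : Int) - L
  · have hmeas : ((coins.length : Int) - L - (lo + 1)).toNat < ((coins.length : Int) - L - lo).toNat := by omega
    intro d hlo hq hdone
    rw [PySem.List.pyRange_one_cons (by omega)]
    simp only [List.foldl_cons]
    have hb : lo + L < (coins.length : Int) := by omega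
    have hgap2 : ∀ x y : Int, y - x = L - 2 → y - x < L := by omega
    -- the inserted value is pvVal coins lo (lo+L)
    have hv : (max
        (coins.getD lo.toNat 0 + min (pvBGet d (lo + 2) (lo + L)) (pvBGet d (lo + 1) (lo + L - 1)))
        (coins.getD (lo + L).toNat 0 + min (pvBGet d (lo + 1) (lo + L - 1)) (pvBGet d lo (lo + L - 2))))
        = pvVal coins lo (lo + L) := by
      rw [pvBGet_eq_val coins d L _ _ hq (by omega) hb (by omega),
          pvBGet_eq_val coins d L _ _ hq (by omega) (by omega) (by omega),
          pvBGet_eq_val coins d L _ _ hq (by omega) (by omega) (by omega),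
          pvVal_step coins lo (lo + L) (by omega)]
    -- apply recursion at lo+1 with the updated dict
    exact pvInner coins L hL (lo + 1) _ (by omega)
      (by
        intro a b ha hab hbn hgap
        rw [PySem.Dict.getD_insert]
        split
        · next heq =>
          exfalso
          simp only [Prod.mk.injEq] at heq
          omega
        · exact hq a b ha hab hbn hgap)
      (by
        intro a ha halo
        rw [PySem.Dict.getD_insert]
        by_cases hal : a = lo
        · subst hal
          rw [if_pos rfl]
          simpa using hv
        · rw [if_neg (by simp [hal]), hdone a ha (by omega)])
  · intro d hlo hq hdone
    rw [show PySem.List.pyRange lo ((coins.length : Int) - L) 1 = [] from by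
      simp [PySem.List.pyRange_one]; omega]
    intro a b ha hab hbn hgap
    by_cases hgl : b - a < L
    · exact hq a b ha hab hbn hgl
    · have : b = a + L := by omega
      subst this
      exact hdone a ha (by omega)
termination_by lo => ((coins.length : Int) - L - lo).toNat

lemma pvQ_mono (coins : List Int) (d : PySem.Dict (Int × Int) Int) (L L' : Int)
    (h : L' ≤ L) (hq : pvQ coins d L) : pvQ coins d L' := by
  intro a b ha hab hbn hgap
  exact hq a b ha hab hbn (by omega)

lemma pvOuter (coins : List Int) :
    ∀ (L : Int) (d : PySem.Dict (Int × Int) Int), 0 ≤ L → L ≤ (coins.length : Int) →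
      pvQ coins d L →
      pvQ coins ((PySem.List.pyRange L (coins.length : Int) 1).foldl (fun dp length =>
        (PySem.List.pyRange 0 ((coins.length : Int) - length) 1).foldl (fun dp a =>
          let b := a + length
          dp.insert (a, b) (max
            (coins.getD a.toNat 0 + min (pvBGet dp (a + 2) b) (pvBGet dp (a + 1) (b - 1)))
            (coins.getD b.toNat 0 + min (pvBGet dp (a + 1) (b - 1)) (pvBGet dp a (b - 2))))) dp) d)
        (coins.length : Int) := by
  intro L
  by_cases hend : L < (coins.length : Int)
  · have hmeas : ((coins.length : Int) - (L + 1)).toNat < ((coins.length : Int) - L).toNat := by omega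
    intro d hL0 hLn hq
    rw [PySem.List.pyRange_one_cons (by omega)]
    simp only [List.foldl_cons]
    exact pvOuter coins (L + 1) _ (by omega) (by omega)
      (pvInner coins L hL0 0 d le_rfl hq (by intro a ha h0; omega))
  · intro d hL0 hLn hq
    rw [show PySem.List.pyRange L (coins.length : Int) 1 = [] from by
      simp [PySem.List.pyRange_one]; omega]
    exact pvQ_mono coins d L _ (by omega) hq
termination_by L => ((coins.length : Int) - L).toNat

lemma maximum_revenue_alt_eq_val (coins : List Int) :
    maximum_revenue_alt coins = pvVal coins 0 ((coins.length : Int) - 1) := by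
  unfold maximum_revenue_alt
  simp only []
  by_cases hn : coins.length = 0
  · rw [show PySem.List.pyRange 0 (coins.length : Int) 1 = [] from by rw [hn]; simp]
    rw [List.foldl_nil, hn]
    norm_num [PySem.Dict.getD_empty]
    rw [pvVal_base coins 0 (-1) (by omega)]
  · have hq : pvQ coins PySem.Dict.empty 0 := by
      intro a b ha hab hbn hgap; omega
    have hfin := pvOuter coins 0 PySem.Dict.empty le_rfl (by omega) hq
    exact hfin 0 ((coins.length : Int) - 1) le_rfl (by omega) (by omega) (by omega)

-- ===== VERDICT (by name: the statement is the Claim_ definition above) =====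
theorem maximum_revenue_spec : Claim_equal_maximum_revenue := by
  intro coins _
  unfold Spec_maximum_revenue
  rw [maximum_revenue_eq_val, maximum_revenue_alt_eq_val]
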